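-- pv_equiv track=rewrite | github.com/dongwonmoon/coding_test | 프로그래머스/2/131127. 할인 행사/할인 행사.py | solution
-- ===== SOURCE A (Python) =====
-- from collections import defaultdict
--
-- def solution(want, number, discount):
--     want_dict = dict(zip(want, number))
--     current = defaultdict(int)
--     count = 0
--
--     # 초기 윈도우 설정
--     for item in discount[:10]:
--         current[item] += 1
--
--     def is_valid():
--         for item in want_dict:
--             if current[item] < want_dict[item]:
--                 return False
--         return True
--
--     if is_valid():
--         count += 1
--
--     # 슬라이딩 윈도우
--     for i in range(10, len(discount)):
--         out_item = discount[i - 10]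
--         in_item = discount[i]
--
--         current[out_item] -= 1
--         if current[out_item] == 0:
--             del current[out_item]
--         current[in_item] += 1
--
--         if is_valid():
--             count += 1
--
--     return count
-- ===== SOURCE B (Python) =====
-- def solution(want, number, discount):
--     # One pass: incremental per-item counts plus a running 'satisfied keys' counter,
--     # instead of rescanning every wanted item for each window.
--     need = dict(zip(want, number))
--     cnt = dict.fromkeys(need, 0)
--     total = len(need)
--     sat = sum(1 for v in need.values() if v <= 0)
--     count = 0
--     for i, item in enumerate(discount):
--         if item in need:
--             cnt[item] += 1
--             if cnt[item] == need[item]: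
--                 sat += 1
--         if i >= 10:
--             out = discount[i - 10]
--             if out in need:
--                 if cnt[out] == need[out]:
--                     sat -= 1
--                 cnt[out] -= 1
--         if i >= 9 and sat == total:
--             count += 1
--     if len(discount) < 10:
--         count = 1 if sat == total else 0
--     return count
-- ===== Notes on version B (the rewrite author's own statement) =====
-- stated objective: faster
-- what changed: Instead of rescanning every wanted item for each of the n-9 windows, B keeps a running count of how many wanted items are currently satisfied and updates it incrementally as the 10-day window slides, checking a window in O(1).
import Mathlib
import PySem

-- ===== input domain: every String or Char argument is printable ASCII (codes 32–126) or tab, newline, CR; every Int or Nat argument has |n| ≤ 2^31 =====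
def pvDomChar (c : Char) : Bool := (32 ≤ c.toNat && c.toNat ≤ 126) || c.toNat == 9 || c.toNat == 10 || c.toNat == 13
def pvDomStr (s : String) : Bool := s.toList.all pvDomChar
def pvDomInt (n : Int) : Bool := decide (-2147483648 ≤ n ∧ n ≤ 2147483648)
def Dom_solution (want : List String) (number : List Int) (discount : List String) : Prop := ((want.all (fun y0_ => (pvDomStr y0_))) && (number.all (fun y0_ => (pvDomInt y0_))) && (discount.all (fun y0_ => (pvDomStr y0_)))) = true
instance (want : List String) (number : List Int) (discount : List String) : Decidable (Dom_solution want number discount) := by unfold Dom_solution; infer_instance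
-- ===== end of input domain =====

-- B replaces A's per-window rescan of all wanted items by a single pass that maintains
-- an incremental count of satisfied wanted items (objective: faster).


-- ===== PORT A =====
-- `is_valid`: scan every wanted item against the current window counts (defaultdict read = getD 0)
def pvIsValid (wd : PySem.Dict String Int) (cur : PySem.Dict String Int) : Bool :=
  wd.keys.all (fun k => !decide (cur.getD k 0 < wd.getD k 0))
-- one iteration of A's sliding-window loop body (i = 10 .. len(discount)-1)
def pvStepA (wd : PySem.Dict String Int) (discount : List String)
    (st : PySem.Dict String Int × Int) (i : Int) : PySem.Dict String Int × Int :=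
  let outItem := PySem.List.pyGetD discount (i - 10) ""
  let inItem := PySem.List.pyGetD discount i ""
  let cur1 := st.1.modify outItem 0 (· - 1)
  let cur2 := if cur1.getD outItem 0 = 0 then cur1.erase outItem else cur1
  let cur3 := cur2.modify inItem 0 (· + 1)
  (cur3, if pvIsValid wd cur3 then st.2 + 1 else st.2)

def solution (want : List String) (number : List Int) (discount : List String) : Int :=
  let wantDict := PySem.Dict.ofList (List.zip want number)
  let current0 := (PySem.List.slice discount none (some 10)).foldl
      (fun c x => c.modify x 0 (· + 1)) PySem.Dict.empty
  let count0 : Int := if pvIsValid wantDict current0 then 1 else 0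
  ((PySem.List.pyRange 10 (discount.length : Int) 1).foldl
      (pvStepA wantDict discount) (current0, count0)).2

-- ===== PORT B =====
-- "if item in need: cnt[item] += 1; if cnt[item] == need[item]: sat += 1"
def pvAdd1 (need : PySem.Dict String Int) (cnt : PySem.Dict String Int) (sat : Int)
    (x : String) : PySem.Dict String Int × Int :=
  if need.contains x then
    let cnt' := cnt.modify x 0 (· + 1)
    (cnt', if cnt'.getD x 0 = need.getD x 0 then sat + 1 else sat)
  else (cnt, sat)

-- "if out in need: if cnt[out] == need[out]: sat -= 1; cnt[out] -= 1"
def pvSub1 (need : PySem.Dict String Int) (cnt : PySem.Dict String Int) (sat : Int)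
    (x : String) : PySem.Dict String Int × Int :=
  if need.contains x then
    (cnt.modify x 0 (· - 1),
     if cnt.getD x 0 = need.getD x 0 then sat - 1 else sat)
  else (cnt, sat)

-- one iteration of B's single pass (p = (i, discount[i])); state = (cnt, sat, count)
def pvStepB (need : PySem.Dict String Int) (discount : List String)
    (st : PySem.Dict String Int × Int × Int) (p : Int × String) : PySem.Dict String Int × Int × Int :=
  let s1 := pvAdd1 need st.1 st.2.1 p.2
  let s2 := if 10 ≤ p.1 then pvSub1 need s1.1 s1.2 (PySem.List.pyGetD discount (p.1 - 10) "") else s1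
  (s2.1, s2.2, if 9 ≤ p.1 ∧ s2.2 = (need.size : Int) then st.2.2 + 1 else st.2.2)

def solution_alt (want : List String) (number : List Int) (discount : List String) : Int :=
  let need := PySem.Dict.ofList (List.zip want number)
  let cnt0 : PySem.Dict String Int := PySem.Dict.ofList (need.keys.map (fun k => (k, 0)))
  let sat0 : Int := ((need.values.filter (fun v => decide (v ≤ 0))).length : Int)
  let st := (PySem.List.enumerate discount 0).foldl (pvStepB need discount) (cnt0, sat0, 0)
  if (discount.length : Int) < 10 then (if st.2.1 = (need.size : Int) then 1 else 0) else st.2.2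

-- ===== PRECONDITION & SPEC =====
def Spec_solution (want : List String) (number : List Int) (discount : List String) (out : Int) : Prop := out = solution_alt want number discount
instance (want : List String) (number : List Int) (discount : List String) (out : Int) : Decidable (Spec_solution want number discount out) := by unfold Spec_solution; infer_instance

-- ===== CLAIM (what is proved, stated in full; the proofs are below) =====
def Claim_equal_solution : Prop := ∀ (want : List String) (number : List Int) (discount : List String), Dom_solution want number discount → Spec_solution want number discount (solution want number discount)

-- ===== LEMMAS AND PROOFS =====
theorem pv_getD_erase (d : PySem.Dict String Int) (k k' : String) (dflt : Int) :
    (d.erase k).getD k' dflt = if k' = k then dflt else d.getD k' dflt := by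
  obtain ⟨l⟩ := d
  simp only [PySem.Dict.erase, PySem.Dict.getD, PySem.Dict.get?]
  induction l with
  | nil => simp
  | cons p rest ih =>
    by_cases hpk : p.1 = k <;> by_cases hpk' : p.1 = k'
    · have hk : k' = k := hpk' ▸ hpk ▸ rfl
      simp [hpk, hk] at ih ⊢
      simpa [hk] using ih
    · have hk : ¬ k' = k := fun h => hpk' (h ▸ hpk)
      have hkk' : (k == k') = false := beq_eq_false_iff_ne.mpr (fun h => hk h.symm)
      simp [List.find?_cons, hpk, hk] at ih ⊢
      simpa [hk, hkk'] using ih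
    · have hk : ¬ k' = k := fun h => hpk (hpk' ▸ h ▸ rfl)
      simp [hpk', hk]
    · simp [hpk, hpk'] at ih ⊢
      exact ih

def pvWin (d : List String) (j : Nat) : List String := (d.drop j).take 10

-- B's running satisfied-items counter, as a function of the per-key window counts
def pvSatS (items : List (String × Int)) (f : String → Int) : Int :=
  (items.countP (fun kv => decide (kv.2 ≤ f kv.1)) : Int)
def pvOk (need : PySem.Dict String Int) (d : List String) (j : Nat) : Bool :=
  need.items.all (fun kv => decide (kv.2 ≤ ((pvWin d j).count kv.1 : Int)))


theorem pv_count_win_succ (d : List String) (t : Nat) (h : t + 10 < d.length) (k : String) :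
    ((pvWin d (t+1)).count k : Int)
      = ((pvWin d t).count k : Int)
        - (if d[t]'(by omega) = k then 1 else 0)
        + (if d[t+10]'(h) = k then 1 else 0) := by
  have h1 : pvWin d t = d[t]'(by omega) :: (d.drop (t+1)).take 9 := by
    unfold pvWin
    rw [List.drop_eq_getElem_cons (by omega)]
    rfl
  have hlen : 9 < (d.drop (t+1)).length := by simp; omega
  have h2 : pvWin d (t+1) = (d.drop (t+1)).take 9 ++ [d[t+10]'(h)] := by
    unfold pvWin
    show (d.drop (t+1)).take (9+1) = _
    rw [List.take_add_one, List.getElem?_eq_getElem hlen]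
    simp
  rw [h1, h2]
  simp only [List.count_cons, List.count_append, beq_iff_eq]
  by_cases h3 : d[t]'(by omega) = k <;> by_cases h4 : d[t+10]'(h) = k <;>
    simp [h3, h4]

theorem pv_cnt0_getD (need : PySem.Dict String Int) (k : String) :
    (PySem.Dict.ofList (need.keys.map (fun x => (x, (0:Int))))).getD k 0 = 0 := by
  simp only [PySem.Dict.ofList, PySem.Dict.update]
  generalize need.keys = ks
  suffices h : ∀ (d : PySem.Dict String Int), d.getD k 0 = 0 →
      ((ks.map (fun x => (x, (0:Int)))).foldl (fun acc p => acc.insert p.1 p.2) d).getD k 0 = 0 by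
    exact h _ (by simp [PySem.Dict.getD_empty])
  induction ks with
  | nil => intro d hd; simpa using hd
  | cons a rest ih =>
    intro d hd
    simp only [List.map_cons, List.foldl_cons]
    exact ih _ (by rw [PySem.Dict.getD_insert]; split <;> simp [hd])

theorem pv_all_congr_mem {α : Type} (l : List α) (p q : α → Bool)
    (h : ∀ a ∈ l, p a = q a) : l.all p = l.all q := by
  induction l with
  | nil => rfl
  | cons a t ih => simp_all

theorem pv_isValid_eq_ok (need : PySem.Dict String Int) (hnd : need.keys.Nodup)
    (cur : PySem.Dict String Int) (d : List String) (j : Nat)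
    (h : ∀ k ∈ need.keys, cur.getD k 0 = ((pvWin d j).count k : Int)) :
    pvIsValid need cur = pvOk need d j := by
  unfold pvIsValid pvOk
  rw [show need.keys = need.items.map Prod.fst from rfl, List.all_map]
  apply pv_all_congr_mem
  intro kv hkv
  have hk : kv.1 ∈ need.keys := PySem.Dict.mem_keys_of_mem_items _ hkv
  have h1 : need.getD kv.1 0 = kv.2 := by
    have := PySem.Dict.getD_of_mem_items (d := need) (k := kv.1) (v := kv.2) (by exact hkv) hnd 0
    exact this
  simp only [Function.comp, h kv.1 hk, h1]
  rw [← decide_not]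
  simp

theorem pv_satS_congr (items : List (String × Int)) (f g : String → Int)
    (h : ∀ kv ∈ items, f kv.1 = g kv.1) : pvSatS items f = pvSatS items g := by
  unfold pvSatS
  congr 1
  apply List.countP_congr
  intro kv hkv
  simp [h kv hkv]

theorem pv_satS_update (items : List (String × Int)) (hnd : (items.map Prod.fst).Nodup)
    (f g : String → Int) (x : String) (v : Int) (hmem : (x, v) ∈ items)
    (h : ∀ k, k ≠ x → f k = g k) :
    pvSatS items g = pvSatS items f + (if v ≤ g x then 1 else 0) - (if v ≤ f x then 1 else 0) := by
  induction items with
  | nil => simp at hmem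
  | cons p rest ih =>
    simp only [List.map_cons, List.nodup_cons] at hnd
    rcases List.mem_cons.mp hmem with hp | hp
    · subst hp
      have hrest : ∀ kv ∈ rest, f kv.1 = g kv.1 := by
        intro kv hkv
        have : kv.1 ≠ x := by
          intro he
          apply hnd.1
          rw [← he]
          exact List.mem_map_of_mem (f := Prod.fst) (a := kv) hkv
        exact h kv.1 this
      have := pv_satS_congr rest f g hrest
      unfold pvSatS at this ⊢
      simp only [List.countP_cons, decide_eq_true_eq]
      push_cast
      split_ifs <;> omega
    · have hx : x ∈ rest.map Prod.fst := List.mem_map_of_mem (f := Prod.fst) (a := (x, v)) hp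
      have hpx : p.1 ≠ x := by
        intro he; apply hnd.1; rw [he]; exact hx
      have := ih hnd.2 hp
      unfold pvSatS at this ⊢
      simp only [List.countP_cons, decide_eq_true_eq]
      rw [h p.1 hpx]
      push_cast
      split_ifs <;> omega



theorem pv_stepA_inv (need : PySem.Dict String Int) (hnd : need.keys.Nodup)
    (d : List String) (t : Nat) (h : t + 10 < d.length) (st : PySem.Dict String Int × Int)
    (h1 : ∀ k, st.1.getD k 0 = ((pvWin d t).count k : Int)) :
    (∀ k, (pvStepA need d st ((10 + t : Nat) : Int)).1.getD k 0 = ((pvWin d (t+1)).count k : Int))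
    ∧ (pvStepA need d st ((10 + t : Nat) : Int)).2
        = if pvOk need d (t+1) then st.2 + 1 else st.2 := by
  have hidx : d[t+10]'(h) = d[10+t]'(by omega) := by congr 1; omega
  have hout : PySem.List.pyGetD d (((10 + t : Nat) : Int) - 10) "" = d[t]'(by omega) := by
    rw [show (((10 + t : Nat) : Int) - 10) = ((t : Nat) : Int) by push_cast; ring,
        PySem.List.pyGetD_natCast, List.getD_eq_getElem _ _ (by omega)]
  have hin : PySem.List.pyGetD d ((10 + t : Nat) : Int) "" = d[10 + t]'(by omega) := by
    rw [PySem.List.pyGetD_natCast, List.getD_eq_getElem _ _ (by omega)]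
  unfold pvStepA
  simp only [hout, hin]
  have hcount := pv_count_win_succ d t h
  rw [hidx] at hcount
  have hcur1 : ∀ k, (st.1.modify (d[t]'(by omega)) 0 (· - 1)).getD k 0
      = ((pvWin d t).count k : Int) - (if d[t]'(by omega) = k then 1 else 0) := by
    intro k
    rw [PySem.Dict.getD_modify]
    by_cases hk : k = d[t]'(by omega)
    · rw [if_pos hk, h1, if_pos hk.symm, hk]
    · rw [if_neg hk, h1, if_neg (fun hh => hk hh.symm)]
      ring
  set cur1 := st.1.modify (d[t]'(by omega)) 0 (· - 1) with hc1
  have hcur2 : ∀ k, (if cur1.getD (d[t]'(by omega)) 0 = 0 then cur1.erase (d[t]'(by omega)) else cur1).getD k 0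
      = cur1.getD k 0 := by
    intro k
    split_ifs with h0
    · rw [pv_getD_erase]
      split_ifs with hk
      · rw [hk, h0]
      · rfl
    · rfl
  set cur2 := if cur1.getD (d[t]'(by omega)) 0 = 0 then cur1.erase (d[t]'(by omega)) else cur1 with hc2
  have hcur3 : ∀ k, (cur2.modify (d[10+t]'(by omega)) 0 (· + 1)).getD k 0
      = ((pvWin d (t+1)).count k : Int) := by
    intro k
    rw [PySem.Dict.getD_modify, hcount k]
    by_cases he : k = d[10+t]'(by omega)
    · rw [if_pos he, hcur2, hcur1,
          if_pos (show d[10+t]'(by omega) = k from he.symm), he]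
    · rw [if_neg he, hcur2, hcur1,
          if_neg (show ¬ d[10+t]'(by omega) = k from fun hh => he hh.symm)]
      ring
  refine ⟨hcur3, ?_⟩
  have hv : pvIsValid need (cur2.modify (d[10+t]'(by omega)) 0 (· + 1)) = pvOk need d (t+1) :=
    pv_isValid_eq_ok need hnd _ d (t+1) (fun k _ => hcur3 k)
  rw [hv]

theorem pv_A_loop (need : PySem.Dict String Int) (hnd : need.keys.Nodup)
    (d : List String) (st0 : PySem.Dict String Int × Int)
    (h0 : ∀ k, st0.1.getD k 0 = ((pvWin d 0).count k : Int))
    (h0c : st0.2 = ((List.range 1).countP (pvOk need d) : Int)) :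
    ∀ t, t + 10 ≤ d.length →
      (∀ k, ((PySem.List.pyRange 10 ((10 + t : Nat) : Int) 1).foldl (pvStepA need d) st0).1.getD k 0
          = ((pvWin d t).count k : Int))
      ∧ ((PySem.List.pyRange 10 ((10 + t : Nat) : Int) 1).foldl (pvStepA need d) st0).2
          = ((List.range (t+1)).countP (pvOk need d) : Int) := by
  intro t
  induction t with
  | zero =>
    intro _
    have : PySem.List.pyRange 10 ((10 + 0 : Nat) : Int) 1 = [] := by decide
    rw [this]
    exact ⟨h0, h0c⟩
  | succ t ih =>
    intro ht
    have ih' := ih (by omega)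
    have hsplit : PySem.List.pyRange 10 ((10 + (t+1) : Nat) : Int) 1
        = PySem.List.pyRange 10 ((10 + t : Nat) : Int) 1 ++ [((10 + t : Nat) : Int)] := by
      rw [show ((10 + (t+1) : Nat) : Int) = ((10 + t : Nat) : Int) + 1 by push_cast; ring]
      exact PySem.List.pyRange_one_succ_right (by exact_mod_cast Nat.le_add_right 10 t)
    rw [hsplit, List.foldl_append, List.foldl_cons, List.foldl_nil]
    have hstep := pv_stepA_inv need hnd d t (by omega)
        ((PySem.List.pyRange 10 ((10 + t : Nat) : Int) 1).foldl (pvStepA need d) st0) ih'.1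
    refine ⟨hstep.1, ?_⟩
    rw [hstep.2, List.range_succ (n := t+1), List.countP_append, ih'.2]
    by_cases hok : pvOk need d (t+1) = true
    · rw [if_pos hok]
      simp [hok]
    · rw [if_neg hok]
      simp [hok]

def pvNumW (n : Nat) : Nat := if n ≤ 10 then 1 else n - 9

theorem pv_numW_eq (n : Nat) (h : 10 ≤ n) : List.range (pvNumW n) = List.range (n - 9) := by
  unfold pvNumW
  split_ifs with h1
  · congr 1
    omega
  · rfl

def pvSpecCount (need : PySem.Dict String Int) (d : List String) : Int :=
  ((List.range (pvNumW d.length)).countP (pvOk need d) : Int)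

theorem pv_A_eq_spec (need : PySem.Dict String Int) (hnd : need.keys.Nodup) (d : List String) :
    (let current0 := (PySem.List.slice d none (some 10)).foldl
        (fun c x => c.modify x 0 (· + 1)) PySem.Dict.empty
     let count0 : Int := if pvIsValid need current0 then 1 else 0
     ((PySem.List.pyRange 10 (d.length : Int) 1).foldl (pvStepA need d) (current0, count0)).2)
      = pvSpecCount need d := by
  show ((PySem.List.pyRange 10 (d.length : Int) 1).foldl (pvStepA need d)
      ((PySem.List.slice d none (some 10)).foldl (fun c x => c.modify x 0 (· + 1)) PySem.Dict.empty,
        if pvIsValid need ((PySem.List.slice d none (some 10)).foldl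
            (fun c x => c.modify x 0 (· + 1)) PySem.Dict.empty) then (1:Int) else 0)).2
      = pvSpecCount need d
  have hcur0 : ∀ k, ((PySem.List.slice d none (some 10)).foldl
      (fun c x => c.modify x 0 (· + 1)) PySem.Dict.empty).getD k 0 = ((pvWin d 0).count k : Int) := by
    intro k
    rw [PySem.List.slice_to (xs := d) (b := 10) (by norm_num), PySem.Dict.getD_foldl_modify_add_one]
    simp [pvWin]
  have hcnt0 : (if pvIsValid need ((PySem.List.slice d none (some 10)).foldl
      (fun c x => c.modify x 0 (· + 1)) PySem.Dict.empty) then (1:Int) else 0)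
      = ((List.range 1).countP (pvOk need d) : Int) := by
    rw [pv_isValid_eq_ok need hnd _ d 0 (fun k _ => hcur0 k)]
    by_cases hok : pvOk need d 0 = true <;> simp [hok, List.range_succ]
  by_cases hn : d.length ≤ 10
  · have hrange : PySem.List.pyRange 10 (d.length : Int) 1 = [] :=
      PySem.List.pyRange_one_eq_nil (by exact_mod_cast hn)
    simp only [hrange, List.foldl_nil]
    rw [hcnt0]
    unfold pvSpecCount pvNumW
    rw [if_pos hn]
  · have h10 : 10 ≤ d.length := by omega
    have hloop := (pv_A_loop need hnd d
        ((PySem.List.slice d none (some 10)).foldl (fun c x => c.modify x 0 (· + 1)) PySem.Dict.empty,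
          if pvIsValid need ((PySem.List.slice d none (some 10)).foldl
              (fun c x => c.modify x 0 (· + 1)) PySem.Dict.empty) then (1:Int) else 0)
        hcur0 hcnt0 (d.length - 10) (by omega)).2
    rw [show ((10 + (d.length - 10) : Nat) : Int) = (d.length : Int) by push_cast; omega] at hloop
    rw [hloop]
    unfold pvSpecCount
    rw [pv_numW_eq _ h10, show d.length - 9 = d.length - 10 + 1 by omega]

theorem pv_satS_eq_size (need : PySem.Dict String Int) (d : List String) (j : Nat) :
    (pvSatS need.items (fun k => ((pvWin d j).count k : Int)) = (need.size : Int))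
      ↔ pvOk need d j = true := by
  unfold pvSatS pvOk
  rw [show need.size = need.items.length from rfl, Nat.cast_inj, List.all_eq_true]
  exact List.countP_eq_length

def pvWinB (d : List String) (m : Nat) : List String := (d.take m).drop (m - 10)







theorem pv_phase_add (need : PySem.Dict String Int) (hnd : need.keys.Nodup)
    (cnt : PySem.Dict String Int) (sat : Int) (x : String) (f : String → Int)
    (h1 : ∀ k ∈ need.keys, cnt.getD k 0 = f k)
    (h2 : sat = pvSatS need.items f) :
    (∀ k ∈ need.keys,
      (pvAdd1 need cnt sat x).1.getD k 0 = f k + (if x = k then 1 else 0))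
    ∧ (pvAdd1 need cnt sat x).2 = pvSatS need.items (fun k => f k + (if x = k then 1 else 0)) := by
  simp only [pvAdd1]
  by_cases hx : x ∈ need.keys
  · rw [if_pos (by rw [PySem.Dict.contains_iff_mem_keys]; exact hx)]
    obtain ⟨kv, hkv, hfst⟩ := List.mem_map.mp hx
    obtain ⟨v, hv⟩ : ∃ v, (x, v) ∈ need.items := ⟨kv.2, by rwa [show (x, kv.2) = kv by rw [← hfst]]⟩
    have hvx : need.getD x 0 = v := PySem.Dict.getD_of_mem_items need hv hnd 0
    have hgx : (cnt.modify x 0 (· + 1)).getD x 0 = f x + 1 := by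
      rw [PySem.Dict.getD_modify, if_pos rfl, h1 x hx]
    constructor
    · intro k hk
      rw [PySem.Dict.getD_modify]
      by_cases hkx : k = x
      · rw [if_pos hkx, h1 x hx, hkx, if_pos rfl]
      · rw [if_neg hkx, h1 k hk, if_neg (fun hh => hkx hh.symm)]
        ring
    · have hupd := pv_satS_update need.items hnd f (fun k => f k + (if x = k then 1 else 0)) x v hv
        (fun k hk => by show f k = f k + ite (x = k) 1 0; rw [if_neg (show ¬ x = k from fun hh => hk hh.symm)]; ring)
      simp only [hgx, hvx, hupd, h2]
      split_ifs <;> omega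
  · rw [if_neg (by rw [PySem.Dict.contains_iff_mem_keys]; exact hx)]
    constructor
    · intro k hk
      have : ¬ x = k := fun hh => hx (hh ▸ hk)
      rw [h1 k hk, if_neg this]
      ring
    · rw [h2]
      apply pv_satS_congr
      intro kv hkv
      have : ¬ x = kv.1 := fun hh => hx (hh ▸ PySem.Dict.mem_keys_of_mem_items need hkv)
      simp [this]

theorem pv_phase_sub (need : PySem.Dict String Int) (hnd : need.keys.Nodup)
    (cnt : PySem.Dict String Int) (sat : Int) (x : String) (f : String → Int)
    (h1 : ∀ k ∈ need.keys, cnt.getD k 0 = f k)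
    (h2 : sat = pvSatS need.items f) :
    (∀ k ∈ need.keys,
      (pvSub1 need cnt sat x).1.getD k 0 = f k - (if x = k then 1 else 0))
    ∧ (pvSub1 need cnt sat x).2 = pvSatS need.items (fun k => f k - (if x = k then 1 else 0)) := by
  simp only [pvSub1]
  by_cases hx : x ∈ need.keys
  · rw [if_pos (by rw [PySem.Dict.contains_iff_mem_keys]; exact hx)]
    obtain ⟨kv, hkv, hfst⟩ := List.mem_map.mp hx
    obtain ⟨v, hv⟩ : ∃ v, (x, v) ∈ need.items := ⟨kv.2, by rwa [show (x, kv.2) = kv by rw [← hfst]]⟩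
    have hvx : need.getD x 0 = v := PySem.Dict.getD_of_mem_items need hv hnd 0
    constructor
    · intro k hk
      rw [PySem.Dict.getD_modify]
      by_cases hkx : k = x
      · rw [if_pos hkx, h1 x hx, hkx, if_pos rfl]
      · rw [if_neg hkx, h1 k hk, if_neg (fun hh => hkx hh.symm)]
        ring
    · have hupd := pv_satS_update need.items hnd f (fun k => f k - (if x = k then 1 else 0)) x v hv
        (fun k hk => by show f k = f k - ite (x = k) 1 0; rw [if_neg (show ¬ x = k from fun hh => hk hh.symm)]; ring)
      simp only [hupd, h2, hvx, h1 x hx]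
      split_ifs <;> omega
  · rw [if_neg (by rw [PySem.Dict.contains_iff_mem_keys]; exact hx)]
    constructor
    · intro k hk
      have : ¬ x = k := fun hh => hx (hh ▸ hk)
      rw [h1 k hk, if_neg this]
      ring
    · rw [h2]
      apply pv_satS_congr
      intro kv hkv
      have : ¬ x = kv.1 := fun hh => hx (hh ▸ PySem.Dict.mem_keys_of_mem_items need hkv)
      simp [this]

theorem pv_winB_snoc (d : List String) (m : Nat) (hm : m < d.length) (hlt : m < 10) :
    pvWinB d (m+1) = pvWinB d m ++ [d[m]'hm] := by
  unfold pvWinB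
  rw [Nat.sub_eq_zero_of_le (by omega), Nat.sub_eq_zero_of_le (by omega),
      List.drop_zero, List.drop_zero, List.take_add_one, List.getElem?_eq_getElem hm]
  rfl

theorem pv_winB_slide (d : List String) (m : Nat) (hm : m < d.length) (h10 : 10 ≤ m) (k : String) :
    ((pvWinB d (m+1)).count k : Int)
      = (((pvWinB d m ++ [d[m]'hm]).count k : Int)) - (if d[m-10]'(by omega) = k then 1 else 0) := by
  have hlen : m - 10 < (d.take m).length := by simp; omega
  have hWm : pvWinB d m = d[m-10]'(by omega) :: ((d.take m).drop (m-9)) := by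
    unfold pvWinB
    rw [List.drop_eq_getElem_cons hlen]
    congr 1
    · simp
    · congr 1
      omega
  have hW1 : pvWinB d (m+1) = ((d.take m).drop (m-9)) ++ [d[m]'hm] := by
    unfold pvWinB
    rw [List.take_add_one, List.getElem?_eq_getElem hm,
        show m + 1 - 10 = m - 9 by omega]
    rw [List.drop_append_of_le_length (by simp; omega)]
    rfl
  rw [hWm, hW1]
  simp only [List.count_append, List.count_cons, beq_iff_eq]
  push_cast
  split_ifs <;> omega

theorem pv_winB_eq_win (d : List String) (m : Nat) (h9 : 9 ≤ m) :
    pvWinB d (m+1) = pvWin d (m-9) := by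
  unfold pvWinB pvWin
  rw [show m + 1 - 10 = m - 9 by omega, List.drop_take, show m + 1 - (m - 9) = 10 by omega]

theorem pv_stepB_inv (need : PySem.Dict String Int) (hnd : need.keys.Nodup)
    (d : List String) (m : Nat) (hm : m < d.length) (st : PySem.Dict String Int × Int × Int)
    (h1 : ∀ k ∈ need.keys, st.1.getD k 0 = ((pvWinB d m).count k : Int))
    (h2 : st.2.1 = pvSatS need.items (fun k => ((pvWinB d m).count k : Int)))
    (h3 : st.2.2 = ((List.range (m - 9)).countP (pvOk need d) : Int)) :
    (∀ k ∈ need.keys, (pvStepB need d st ((m : Int), d[m]'hm)).1.getD k 0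
        = ((pvWinB d (m+1)).count k : Int))
    ∧ (pvStepB need d st ((m : Int), d[m]'hm)).2.1
        = pvSatS need.items (fun k => ((pvWinB d (m+1)).count k : Int))
    ∧ (pvStepB need d st ((m : Int), d[m]'hm)).2.2
        = ((List.range (m + 1 - 9)).countP (pvOk need d) : Int) := by
  have hadd := pv_phase_add need hnd st.1 st.2.1 (d[m]'hm)
      (fun k => ((pvWinB d m).count k : Int)) h1 h2
  simp only [pvStepB]
  by_cases h10 : 10 ≤ m
  · have hc : (10:Int) ≤ ((m:Nat):Int) := by exact_mod_cast h10
    rw [if_pos hc]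
    have hout : PySem.List.pyGetD d (((m:Nat):Int) - 10) "" = d[m-10]'(by omega) := by
      rw [show ((m:Nat):Int) - 10 = ((m - 10 : Nat) : Int) by push_cast [h10]; ring,
          PySem.List.pyGetD_natCast, List.getD_eq_getElem _ _ (by omega)]
    rw [hout]
    have hsub := pv_phase_sub need hnd _ _ (d[m-10]'(by omega))
        (fun k => ((pvWinB d m).count k : Int) + (if d[m]'hm = k then 1 else 0)) hadd.1 hadd.2
    have hcount : ∀ k, ((pvWinB d (m+1)).count k : Int)
        = ((pvWinB d m).count k : Int) + (if d[m]'hm = k then 1 else 0)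
          - (if d[m-10]'(by omega) = k then 1 else 0) := by
      intro k
      rw [pv_winB_slide d m hm h10 k]
      simp only [List.count_append, List.count_cons, beq_iff_eq]
      push_cast
      split_ifs <;> simp_all
    refine ⟨?_, ?_, ?_⟩
    · intro k hk
      rw [hsub.1 k hk, hcount k]
    · rw [hsub.2]
      apply pv_satS_congr
      intro kv _
      rw [hcount kv.1]
    · -- count component
      have hsat : (pvSub1 need (pvAdd1 need st.1 st.2.1 (d[m]'hm)).1
            (pvAdd1 need st.1 st.2.1 (d[m]'hm)).2 (d[m-10]'(by omega))).2
          = pvSatS need.items (fun k => ((pvWinB d (m+1)).count k : Int)) := by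
        rw [hsub.2]
        apply pv_satS_congr
        intro kv _
        rw [hcount kv.1]
      rw [hsat, h3]
      have h9 : (9:Int) ≤ ((m:Nat):Int) := by exact_mod_cast (by omega : 9 ≤ m)
      rw [pv_winB_eq_win d m (by omega)]
      rw [show m + 1 - 9 = (m - 9) + 1 by omega, List.range_succ, List.countP_append]
      by_cases hok : pvOk need d (m-9) = true
      · rw [if_pos ⟨h9, (pv_satS_eq_size need d (m-9)).mpr hok⟩]
        simp [hok]
      · rw [if_neg (fun hc2 => hok ((pv_satS_eq_size need d (m-9)).mp hc2.2))]
        simp [hok]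
  · have hc : ¬ ((10:Int) ≤ ((m:Nat):Int)) := by exact_mod_cast h10
    rw [if_neg hc]
    have hcount : ∀ k, ((pvWinB d (m+1)).count k : Int)
        = ((pvWinB d m).count k : Int) + (if d[m]'hm = k then 1 else 0) := by
      intro k
      rw [pv_winB_snoc d m hm (by omega)]
      simp only [List.count_append, List.count_cons, beq_iff_eq]
      push_cast
      split_ifs <;> simp_all
    refine ⟨?_, ?_, ?_⟩
    · intro k hk
      rw [hadd.1 k hk, hcount k]
    · rw [hadd.2]
      apply pv_satS_congr
      intro kv _
      rw [hcount kv.1]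
    · by_cases h9 : 9 ≤ m
      · -- m = 9 exactly (since m < 10)
        have hm9 : m = 9 := by omega
        have h9i : (9:Int) ≤ ((m:Nat):Int) := by exact_mod_cast h9
        have hsat : (pvAdd1 need st.1 st.2.1 (d[m]'hm)).2
            = pvSatS need.items (fun k => ((pvWinB d (m+1)).count k : Int)) := by
          rw [hadd.2]
          apply pv_satS_congr
          intro kv _
          rw [hcount kv.1]
        rw [hsat, h3]
        rw [pv_winB_eq_win d m h9]
        rw [show m + 1 - 9 = (m - 9) + 1 by omega, List.range_succ, List.countP_append]
        by_cases hok : pvOk need d (m-9) = true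
        · rw [if_pos ⟨h9i, (pv_satS_eq_size need d (m-9)).mpr hok⟩]
          simp [hok]
        · rw [if_neg (fun hc2 => hok ((pv_satS_eq_size need d (m-9)).mp hc2.2))]
          simp [hok]
      · have h9i : ¬ ((9:Int) ≤ ((m:Nat):Int)) := by exact_mod_cast h9
        rw [if_neg (fun hc2 => h9i hc2.1), h3]
        rw [show m + 1 - 9 = m - 9 by omega]

theorem pv_B_loop (need : PySem.Dict String Int) (hnd : need.keys.Nodup) (d : List String)
    (cnt0 : PySem.Dict String Int) (sat0 : Int)
    (hc0 : ∀ k, cnt0.getD k 0 = 0)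
    (hs0 : sat0 = pvSatS need.items (fun _ => 0)) :
    ∀ m, m ≤ d.length →
      (∀ k ∈ need.keys,
        ((PySem.List.enumerate (d.take m) 0).foldl (pvStepB need d) (cnt0, sat0, 0)).1.getD k 0
          = ((pvWinB d m).count k : Int))
      ∧ ((PySem.List.enumerate (d.take m) 0).foldl (pvStepB need d) (cnt0, sat0, 0)).2.1
          = pvSatS need.items (fun k => ((pvWinB d m).count k : Int))
      ∧ ((PySem.List.enumerate (d.take m) 0).foldl (pvStepB need d) (cnt0, sat0, 0)).2.2
          = ((List.range (m - 9)).countP (pvOk need d) : Int) := by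
  intro m
  induction m with
  | zero =>
    intro _
    simp only [List.take_zero, PySem.List.enumerate_nil, List.foldl_nil]
    refine ⟨fun k _ => by simp [pvWinB, hc0 k], ?_, by simp⟩
    rw [hs0]
    apply pv_satS_congr
    intro kv _
    simp [pvWinB]
  | succ m ih =>
    intro hm1
    have hm : m < d.length := by omega
    have ih' := ih (by omega)
    have hsplit : PySem.List.enumerate (d.take (m+1)) 0
        = PySem.List.enumerate (d.take m) 0 ++ [((m : Int), d[m]'hm)] := by
      rw [List.take_add_one, List.getElem?_eq_getElem hm]
      rw [show (some (d[m]'hm)).toList = [d[m]'hm] from rfl, PySem.List.enumerate_append]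
      simp [PySem.List.enumerate_cons, PySem.List.enumerate_nil, List.length_take,
            Nat.min_eq_left (Nat.le_of_lt hm)]
    rw [hsplit, List.foldl_append, List.foldl_cons, List.foldl_nil]
    exact pv_stepB_inv need hnd d m hm _ ih'.1 ih'.2.1 ih'.2.2

theorem pv_B_eq_spec (need : PySem.Dict String Int) (hnd : need.keys.Nodup) (d : List String) :
    (let cnt0 : PySem.Dict String Int := PySem.Dict.ofList (need.keys.map (fun k => (k, 0)))
     let sat0 : Int := ((need.values.filter (fun v => decide (v ≤ 0))).length : Int)
     let st := (PySem.List.enumerate d 0).foldl (pvStepB need d) (cnt0, sat0, 0)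
     if (d.length : Int) < 10 then (if st.2.1 = (need.size : Int) then 1 else 0) else st.2.2)
      = pvSpecCount need d := by
  show (let st := (PySem.List.enumerate d 0).foldl (pvStepB need d)
          (PySem.Dict.ofList (need.keys.map (fun k => (k, 0))),
           ((need.values.filter (fun v => decide (v ≤ 0))).length : Int), 0)
        if (d.length : Int) < 10 then (if st.2.1 = (need.size : Int) then 1 else 0) else st.2.2)
      = pvSpecCount need d
  simp only []
  have hs0 : ((need.values.filter (fun v => decide (v ≤ 0))).length : Int)
      = pvSatS need.items (fun _ => (0:Int)) := by
    unfold pvSatS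
    rw [← List.countP_eq_length_filter,
        show need.values = need.items.map Prod.snd from rfl, List.countP_map]
    rfl
  have henum : PySem.List.enumerate d 0 = PySem.List.enumerate (d.take d.length) 0 := by
    rw [List.take_length]
  rw [henum]
  have hloop := pv_B_loop need hnd d (PySem.Dict.ofList (need.keys.map (fun k => (k, 0))))
      ((need.values.filter (fun v => decide (v ≤ 0))).length : Int)
      (fun k => pv_cnt0_getD need k) hs0 d.length (le_refl _)
  by_cases hn : (d.length : Int) < 10
  · rw [if_pos hn]
    have hn' : d.length < 10 := by exact_mod_cast hn
    have hwin : pvWinB d d.length = pvWin d 0 := by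
      unfold pvWinB pvWin
      rw [Nat.sub_eq_zero_of_le (by omega), List.drop_zero, List.drop_zero, List.take_length,
          List.take_of_length_le (by omega)]
    rw [hloop.2.1, hwin]
    unfold pvSpecCount pvNumW
    rw [if_pos (by omega : d.length ≤ 10)]
    by_cases hok : pvOk need d 0 = true
    · rw [if_pos ((pv_satS_eq_size need d 0).mpr hok)]
      simp [hok, List.range_succ]
    · rw [if_neg (fun hc => hok ((pv_satS_eq_size need d 0).mp hc))]
      simp [hok, List.range_succ]
  · rw [if_neg hn]
    have h10 : 10 ≤ d.length := by
      by_contra hcon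
      exact hn (by exact_mod_cast (by omega : d.length < 10))
    rw [hloop.2.2]
    unfold pvSpecCount
    rw [pv_numW_eq _ h10]

-- ===== VERDICT (by name: the statement is the Claim_ definition above) =====
theorem solution_spec : Claim_equal_solution := by
  intro want number discount _
  unfold Spec_solution solution solution_alt
  rw [pv_A_eq_spec _ (PySem.Dict.nodup_keys_ofList _) discount,
      pv_B_eq_spec _ (PySem.Dict.nodup_keys_ofList _) discount]
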